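-- pv_equiv track=rewrite | github.com/1593726048/Advent-Of-Code-2021 | src/Year2022/Day15/Question1.py | get_beacons_in_length
-- ===== SOURCE A (Python) =====
-- from typing import List
--
-- def get_beacons_in_length(invalid_xs: List[List[int]], beacons, y_level):
--     values = []
--     for beacon in beacons:
--         if beacon[1] == y_level:
--             for x_s, x_f in invalid_xs:
--                 if x_s <= beacon[0] <= x_f and beacon[0] not in values:
--                     values.append(beacon[0])
--     return len(values)
-- ===== SOURCE B (Python) =====
-- def get_beacons_in_length(invalid_xs, beacons, y_level):
--     # Distinct candidate x's on the target row, then a sort-and-merge pass over the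
--     # intervals so each candidate is tested against non-overlapping merged intervals.
--     candidates = {b[0] for b in beacons if b[1] == y_level}
--     if not candidates:
--         return 0
--     merged = []
--     for s, f in sorted(invalid_xs, key=lambda iv: iv[0]):
--         if merged and s <= merged[-1][1]:
--             merged[-1] = (merged[-1][0], max(merged[-1][1], f))
--         else:
--             merged.append((s, f))
--     return sum(1 for x in candidates if any(s <= x <= f for s, f in merged))
-- ===== Notes on version B (the rewrite author's own statement) =====
-- stated objective: alternative
-- what changed: Instead of scanning all intervals and a growing dedup list per beacon, B builds the distinct candidate x's as a set in one pass, sorts the intervals by start and merges them into non-overlapping intervals once, then counts the candidates covered by the merged intervals.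
import Mathlib
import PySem

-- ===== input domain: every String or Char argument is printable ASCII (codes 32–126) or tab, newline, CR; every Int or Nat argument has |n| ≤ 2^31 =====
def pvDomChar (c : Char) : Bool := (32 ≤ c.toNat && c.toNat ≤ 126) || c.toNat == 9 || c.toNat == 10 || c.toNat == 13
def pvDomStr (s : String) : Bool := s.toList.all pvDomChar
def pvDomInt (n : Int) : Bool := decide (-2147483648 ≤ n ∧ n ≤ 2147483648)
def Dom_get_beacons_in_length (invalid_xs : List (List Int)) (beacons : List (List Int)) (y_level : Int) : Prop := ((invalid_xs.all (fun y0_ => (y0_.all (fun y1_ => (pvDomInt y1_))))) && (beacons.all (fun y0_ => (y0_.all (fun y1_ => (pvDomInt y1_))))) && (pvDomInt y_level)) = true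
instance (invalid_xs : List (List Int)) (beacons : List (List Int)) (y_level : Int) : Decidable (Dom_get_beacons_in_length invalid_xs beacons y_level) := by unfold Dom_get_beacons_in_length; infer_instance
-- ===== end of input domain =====

-- B replaces A's per-beacon interval scan + dedup-list with: a set of candidate x's, a
-- sort-and-merge of the intervals, and one covered-count over the candidates.


-- ===== PORT A =====
def get_beacons_in_length (invalid_xs : List (List Int)) (beacons : List (List Int)) (y_level : Int) : Int :=
  let values : List Int := beacons.foldl (fun values beacon =>
    if PySem.List.pyGetD beacon 1 0 = y_level then
      invalid_xs.foldl (fun values iv =>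
        let x_s := PySem.List.pyGetD iv 0 0
        let x_f := PySem.List.pyGetD iv 1 0
        if x_s ≤ PySem.List.pyGetD beacon 0 0 ∧ PySem.List.pyGetD beacon 0 0 ≤ x_f ∧
            ¬ (PySem.List.pyGetD beacon 0 0 ∈ values) then
          values ++ [PySem.List.pyGetD beacon 0 0]
        else values) values
    else values) []
  (values.length : Int)

-- ===== PORT B =====
-- merged is kept in REVERSE (its head is Python's merged[-1]); only membership-style
-- queries (any) are made on it afterwards, so the direction is immaterial.
def get_beacons_in_length_alt (invalid_xs : List (List Int)) (beacons : List (List Int)) (y_level : Int) : Int :=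
  let candidates : PySem.Set Int :=
    PySem.Set.ofList ((beacons.filter (fun b => PySem.List.pyGetD b 1 0 = y_level)).map
      (fun b => PySem.List.pyGetD b 0 0))
  if candidates.isEmpty then 0
  else
    let merged : List (Int × Int) :=
      (PySem.List.sorted invalid_xs (fun iv => PySem.List.pyGetD iv 0 0) false).foldl
        (fun acc iv =>
          let s := PySem.List.pyGetD iv 0 0
          let f := PySem.List.pyGetD iv 1 0
          match acc with
          | [] => [(s, f)]
          | (ls, lf) :: rest => if s ≤ lf then (ls, max lf f) :: rest else (s, f) :: (ls, lf) :: rest)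
        []
    ((candidates.filter (fun x => merged.any (fun p => p.1 ≤ x && x ≤ p.2))).length : Int)

-- ===== PRECONDITION & SPEC =====
-- Pre_ is exactly where the Python A returns: every beacon long enough for beacon[1], and,
-- if some beacon lies on y_level (so A unpacks the intervals), every interval of length exactly 2.
def Pre_get_beacons_in_length (invalid_xs : List (List Int)) (beacons : List (List Int)) (y_level : Int) : Prop :=
  (∀ b ∈ beacons, 2 ≤ b.length) ∧
    ((∃ b ∈ beacons, PySem.List.pyGetD b 1 0 = y_level) → ∀ iv ∈ invalid_xs, iv.length = 2)
instance (invalid_xs : List (List Int)) (beacons : List (List Int)) (y_level : Int) : Decidable (Pre_get_beacons_in_length invalid_xs beacons y_level) := by unfold Pre_get_beacons_in_length; infer_instance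
def pvWitness_get_beacons_in_length : List (List Int) × List (List Int) × Int :=
  ([[0, 4], [6, 9]], [[2, 1], [7, 1], [2, 1], [5, 1], [3, 0]], 1)
def Spec_get_beacons_in_length (invalid_xs : List (List Int)) (beacons : List (List Int)) (y_level : Int) (out : Int) : Prop := out = get_beacons_in_length_alt invalid_xs beacons y_level
instance (invalid_xs : List (List Int)) (beacons : List (List Int)) (y_level : Int) (out : Int) : Decidable (Spec_get_beacons_in_length invalid_xs beacons y_level out) := by unfold Spec_get_beacons_in_length; infer_instance

-- ===== CLAIM (what is proved, stated in full; the proofs are below) =====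
def Claim_equal_get_beacons_in_length : Prop := ∀ (invalid_xs : List (List Int)) (beacons : List (List Int)) (y_level : Int), Dom_get_beacons_in_length invalid_xs beacons y_level → Pre_get_beacons_in_length invalid_xs beacons y_level → Spec_get_beacons_in_length invalid_xs beacons y_level (get_beacons_in_length invalid_xs beacons y_level)

-- ===== LEMMAS AND PROOFS =====

-- x is covered by a raw interval / by some raw interval of a list (Prop and Bool forms)
def pvCovIv (x : Int) (iv : List Int) : Prop :=
  PySem.List.pyGetD iv 0 0 ≤ x ∧ x ≤ PySem.List.pyGetD iv 1 0
def pvCovL (x : Int) (L : List (List Int)) : Prop := ∃ iv  ∈ L, pvCovIv x iv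
def pvCovM (x : Int) (acc : List (Int × Int)) : Prop := ∃ p  ∈ acc, p.1 ≤ x ∧ x ≤ p.2
def pvCovLB (x : Int) (L : List (List Int)) : Bool :=
  L.any (fun iv => decide (PySem.List.pyGetD iv 0 0 ≤ x) && decide (x ≤ PySem.List.pyGetD iv 1 0))

theorem pvCovLB_iff (x : Int) (L : List (List Int)) : pvCovLB x L = true ↔ pvCovL x L := by
  simp [pvCovLB, pvCovL, pvCovIv]

def pvMergeStep (acc : List (Int × Int)) (iv : List Int) : List (Int × Int) :=
  let s := PySem.List.pyGetD iv 0 0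
  let f := PySem.List.pyGetD iv 1 0
  match acc with
  | [] => [(s, f)]
  | (ls, lf) :: rest => if s ≤ lf then (ls, max lf f) :: rest else (s, f) :: (ls, lf) :: rest

-- merging preserves the union of covered points
theorem pv_merge_cover (L : List (List Int)) (acc : List (Int × Int)) (x : Int)
    (hp : L.Pairwise (fun a b => PySem.List.pyGetD a 0 0 ≤ PySem.List.pyGetD b 0 0))
    (hacc : ∀ p, acc.head? = some p → ∀ iv ∈ L, p.1 ≤ PySem.List.pyGetD iv 0 0) :
    pvCovM x (L.foldl pvMergeStep acc) ↔ pvCovM x acc ∨ pvCovL x L := by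
  induction L generalizing acc with
  | nil => simp [pvCovL]
  | cons iv L ih =>
    rcases List.pairwise_cons.mp hp with ⟨hiv, hp'⟩
    have hstep : (pvCovM x (pvMergeStep acc iv) ↔ pvCovM x acc ∨ pvCovIv x iv) ∧
        (∀ p, (pvMergeStep acc iv).head? = some p → ∀ iv' ∈ L, p.1 ≤ PySem.List.pyGetD iv' 0 0) := by
      match hacc' : acc with
      | [] =>
        constructor
        · simp [pvMergeStep, pvCovM, pvCovIv]
        · intro p hp'' iv' hiv'
          simp only [pvMergeStep, List.head?_cons, Option.some.injEq] at hp''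
          subst hp''
          exact hiv iv' hiv'
      | (ls, lf) :: rest =>
        have hls : ls ≤ PySem.List.pyGetD iv 0 0 := hacc (ls, lf) (by simp) iv (by simp)
        by_cases hm : PySem.List.pyGetD iv 0 0 ≤ lf
        · constructor
          · simp only [pvMergeStep, hm, if_pos, pvCovM, pvCovIv, List.mem_cons]
            constructor
            · rintro ⟨p, hp, h1, h2⟩
              rcases hp with rfl | hp
              · simp only at h1 h2
                rw [le_max_iff] at h2
                rcases h2 with h2 | h2
                · exact Or.inl ⟨(ls, lf), Or.inl rfl, h1, h2⟩
                · by_cases hx : x ≤ lf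
                  · exact Or.inl ⟨(ls, lf), Or.inl rfl, h1, hx⟩
                  · exact Or.inr ⟨by omega, h2⟩
              · exact Or.inl ⟨p, Or.inr hp, h1, h2⟩
            · rintro (⟨p, hp, h1, h2⟩ | ⟨h1, h2⟩)
              · rcases hp with rfl | hp
                · exact ⟨(ls, max lf (PySem.List.pyGetD iv 1 0)), Or.inl rfl, h1,
                    le_max_iff.mpr (Or.inl h2)⟩
                · exact ⟨p, Or.inr hp, h1, h2⟩
              · exact ⟨(ls, max lf (PySem.List.pyGetD iv 1 0)), Or.inl rfl, by omega,
                  le_max_iff.mpr (Or.inr h2)⟩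
          · intro p hp'' iv' hiv'
            simp only [pvMergeStep, hm, if_pos, List.head?_cons, Option.some.injEq] at hp''
            subst hp''
            exact le_trans hls (hiv iv' hiv')
        · constructor
          · simp only [pvMergeStep, hm, if_neg, not_false_iff, pvCovM, pvCovIv, List.mem_cons]
            constructor
            · rintro ⟨p, hp, h1, h2⟩
              rcases hp with rfl | hp
              · exact Or.inr ⟨h1, h2⟩
              · exact Or.inl ⟨p, hp, h1, h2⟩
            · rintro (⟨p, hp, h1, h2⟩ | ⟨h1, h2⟩)
              · exact ⟨p, Or.inr hp, h1, h2⟩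
              · exact ⟨(PySem.List.pyGetD iv 0 0, PySem.List.pyGetD iv 1 0), Or.inl rfl, h1, h2⟩
          · intro p hp'' iv' hiv'
            simp only [pvMergeStep, hm, if_neg, not_false_iff, List.head?_cons, Option.some.injEq] at hp''
            subst hp''
            exact hiv iv' hiv'
    obtain ⟨hcov, hhead⟩ := hstep
    rw [List.foldl_cons, ih (pvMergeStep acc iv) hp' hhead]
    simp only [pvCovL, List.mem_cons]
    constructor
    · rintro (h | ⟨iv', h1, h2⟩)
      · rcases hcov.mp h with h' | h'
        · exact Or.inl h'
        · exact Or.inr ⟨iv, Or.inl rfl, h'⟩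
      · exact Or.inr ⟨iv', Or.inr h1, h2⟩
    · rintro (h | ⟨iv', h1, h2⟩)
      · exact Or.inl (hcov.mpr (Or.inl h))
      · rcases h1 with rfl | h1
        · exact Or.inl (hcov.mpr (Or.inr h2))
        · exact Or.inr ⟨iv', h1, h2⟩

-- A's inner fold over the intervals adds b0 iff b0 is covered and not yet recorded
theorem pv_inner_fold (ivs : List (List Int)) (values : List Int) (b0 : Int) :
    ivs.foldl (fun values iv =>
        let x_s := PySem.List.pyGetD iv 0 0
        let x_f := PySem.List.pyGetD iv 1 0
        if x_s ≤ b0 ∧ b0 ≤ x_f ∧ ¬ (b0 ∈ values) then values ++ [b0] else values) values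
      = if pvCovLB b0 ivs = true ∧ ¬ (b0 ∈ values) then values ++ [b0] else values := by
  induction ivs generalizing values with
  | nil => simp [pvCovLB]
  | cons iv ivs ih =>
    simp only [List.foldl_cons]
    by_cases hmem : b0 ∈ values
    · rw [ih]
      simp [hmem]
    · by_cases hc : PySem.List.pyGetD iv 0 0 ≤ b0 ∧ b0 ≤ PySem.List.pyGetD iv 1 0
      · rw [if_pos ⟨hc.1, hc.2, hmem⟩, ih, if_neg (by simp),
          if_pos ⟨(pvCovLB_iff b0 (iv :: ivs)).mpr ⟨iv, by simp, hc⟩, hmem⟩]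
      · rw [if_neg (by tauto), ih]
        by_cases hrest : pvCovL b0 ivs
        · have hcons : pvCovL b0 (iv :: ivs) := by
            obtain ⟨iv', h1, h2⟩ := hrest
            exact ⟨iv', by simp [h1], h2⟩
          rw [if_pos ⟨(pvCovLB_iff b0 ivs).mpr hrest, hmem⟩,
            if_pos ⟨(pvCovLB_iff b0 (iv :: ivs)).mpr hcons, hmem⟩]
        · have hn1 : ¬ (pvCovLB b0 ivs = true ∧ ¬ b0 ∈ values) :=
            fun hh => hrest ((pvCovLB_iff b0 ivs).mp hh.1)
          have hn2 : ¬ (pvCovLB b0 (iv :: ivs) = true ∧ ¬ b0 ∈ values) := by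
            rintro ⟨hh, -⟩
            rcases (pvCovLB_iff b0 (iv :: ivs)).mp hh with ⟨iv', h1, h2⟩
            rcases List.mem_cons.mp h1 with rfl | h1
            · exact hc h2
            · exact hrest ⟨iv', h1, h2⟩
          rw [if_neg hn1, if_neg hn2]

-- A's outer fold maintains: values = (candidate set so far).filter covered
theorem pv_outer_fold (invalid_xs : List (List Int)) (y_level : Int)
    (bs : List (List Int)) (S : List Int) :
    bs.foldl (fun values beacon =>
        if PySem.List.pyGetD beacon 1 0 = y_level then
          invalid_xs.foldl (fun values iv =>
            let x_s := PySem.List.pyGetD iv 0 0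
            let x_f := PySem.List.pyGetD iv 1 0
            if x_s ≤ PySem.List.pyGetD beacon 0 0 ∧ PySem.List.pyGetD beacon 0 0 ≤ x_f ∧
                ¬ (PySem.List.pyGetD beacon 0 0 ∈ values) then
              values ++ [PySem.List.pyGetD beacon 0 0]
            else values) values
        else values)
      (S.filter (fun x => pvCovLB x invalid_xs))
    = (bs.foldl (fun S beacon =>
        if PySem.List.pyGetD beacon 1 0 = y_level then
          PySem.Set.add S (PySem.List.pyGetD beacon 0 0) else S) S).filter
        (fun x => pvCovLB x invalid_xs) := by
  induction bs generalizing S with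
  | nil => rfl
  | cons b bs ih =>
    simp only [List.foldl_cons]
    by_cases hy : PySem.List.pyGetD b 1 0 = y_level
    · rw [if_pos hy, if_pos hy, pv_inner_fold]
      set b0 := PySem.List.pyGetD b 0 0 with hb0
      rw [PySem.Set.add_eq_ite]
      by_cases hcov : pvCovL b0 invalid_xs
      · have hb : pvCovLB b0 invalid_xs = true := (pvCovLB_iff b0 invalid_xs).mpr hcov
        by_cases hS : b0 ∈ S
        · have : b0 ∈ S.filter (fun x => pvCovLB x invalid_xs) :=
            List.mem_filter.mpr ⟨hS, hb⟩
          rw [if_neg (by tauto), if_pos hS]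
          exact ih S
        · have hnf : ¬ b0 ∈ S.filter (fun x => pvCovLB x invalid_xs) := by
            intro h; exact hS (List.mem_filter.mp h).1
          rw [if_pos ⟨hb, hnf⟩, if_neg hS]
          have : S.filter (fun x => pvCovLB x invalid_xs) ++ [b0]
              = (S ++ [b0]).filter (fun x => pvCovLB x invalid_xs) := by
            simp [List.filter_append, hb]
          rw [this]
          exact ih (S ++ [b0])
      · have hb : pvCovLB b0 invalid_xs = false := by
          rw [Bool.eq_false_iff]
          exact fun hh => hcov ((pvCovLB_iff b0 invalid_xs).mp hh)
        rw [if_neg (fun hh => hcov ((pvCovLB_iff b0 invalid_xs).mp hh.1))]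
        by_cases hS : b0 ∈ S
        · rw [if_pos hS]; exact ih S
        · rw [if_neg hS]
          have : S.filter (fun x => pvCovLB x invalid_xs)
              = (S ++ [b0]).filter (fun x => pvCovLB x invalid_xs) := by
            simp [List.filter_append, hb]
          rw [this]
          exact ih (S ++ [b0])
    · rw [if_neg hy, if_neg hy]; exact ih S

-- the merged intervals cover exactly what the raw intervals cover
theorem pv_merged_cover (invalid_xs : List (List Int)) (x : Int) :
    pvCovM x ((PySem.List.sorted invalid_xs (fun iv => PySem.List.pyGetD iv 0 0) false).foldl
        pvMergeStep []) ↔ pvCovL x invalid_xs := by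
  rw [pv_merge_cover (PySem.List.sorted invalid_xs (fun iv => PySem.List.pyGetD iv 0 0) false)
    [] x (by simpa using PySem.List.sorted_pairwise invalid_xs (fun iv => PySem.List.pyGetD iv 0 0)) (by simp)]
  simp only [pvCovM, List.not_mem_nil, false_and, exists_false, false_or, pvCovL]
  constructor
  · rintro ⟨iv, h1, h2⟩
    exact ⟨iv, (PySem.List.mem_sorted _ _ _ _).mp h1, h2⟩
  · rintro ⟨iv, h1, h2⟩
    exact ⟨iv, (PySem.List.mem_sorted _ _ _ _).mpr h1, h2⟩

-- ===== VERDICT (by name: the statement is the Claim_ definition above) =====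
theorem pv_if_empty (l : List Int) (p : Int → Bool) :
    (if l.isEmpty then (0 : Int) else ((l.filter p).length : Int)) = ((l.filter p).length : Int) := by
  cases l <;> simp

theorem get_beacons_in_length_spec : Claim_equal_get_beacons_in_length := by
  intro invalid_xs beacons y_level _ _
  unfold Spec_get_beacons_in_length
  have h1 := pv_outer_fold invalid_xs y_level beacons []
  simp only [List.filter_nil] at h1
  have hset : beacons.foldl (fun S beacon =>
        if PySem.List.pyGetD beacon 1 0 = y_level then
          PySem.Set.add S (PySem.List.pyGetD beacon 0 0) else S) []
      = PySem.Set.ofList ((beacons.filter (fun b => decide (PySem.List.pyGetD b 1 0 = y_level))).map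
          (fun b => PySem.List.pyGetD b 0 0)) := by
    rw [PySem.Set.ofList_eq_foldl, List.foldl_map, List.foldl_filter]
    congr 1
    funext S b
    simp
  simp only [get_beacons_in_length, get_beacons_in_length_alt]
  rw [pv_if_empty, h1, hset]
  congr 1
  congr 1
  apply List.filter_congr
  intro x _
  show pvCovLB x invalid_xs
      = ((PySem.List.sorted invalid_xs (fun iv => PySem.List.pyGetD iv 0 0) false).foldl
          pvMergeStep []).any (fun p => decide (p.1 ≤ x) && decide (x ≤ p.2))
  have hm := pv_merged_cover invalid_xs x
  by_cases h : pvCovL x invalid_xs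
  · rw [(pvCovLB_iff x invalid_xs).mpr h]
    obtain ⟨p, hp, h1, h2⟩ := hm.mpr h
    exact (List.any_eq_true.mpr ⟨p, hp, by simp [h1, h2]⟩).symm
  · rw [show pvCovLB x invalid_xs = false by
      rw [Bool.eq_false_iff]; exact fun hh => h ((pvCovLB_iff x invalid_xs).mp hh)]
    symm
    rw [List.any_eq_false]
    intro p hp
    simp only [Bool.and_eq_true, decide_eq_true_eq, not_and]
    intro h1 h2
    exact absurd (hm.mp ⟨p, hp, h1, h2⟩) h
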